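-- pv_equiv track=rewrite | github.com/SofaDefrost/SofaComponents | python/genpy.py | select_single_template
-- ===== SOURCE A (Python) =====
-- def select_single_template(default_template, template_list):
--     if default_template:
--         return default_template
--     for dim in ["Vec3", "Rigid3", "Vec2", "Rigid2", "Vec1"]:
--         for template in template_list:
--             if "Cuda" not in template and dim in template:
--                 return template
--
--     for template in template_list:
--         return template
--
--     return ""
-- ===== SOURCE B (Python) =====
-- def select_single_template(default_template, template_list):
--     if default_template:
--         return default_template
--     dims = ["Vec3", "Rigid3", "Vec2", "Rigid2", "Vec1"]
--     best_rank = None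
--     best_template = None
--     for template in template_list:
--         if "Cuda" in template:
--             continue
--         for i, dim in enumerate(dims):
--             if dim in template:
--                 if best_rank is None or i < best_rank:
--                     best_rank = i
--                     best_template = template
--                 break
--     if best_template is not None:
--         return best_template
--     if template_list:
--         return template_list[0]
--     return ""
-- ===== Notes on version B (the rewrite author's own statement) =====
-- stated objective: alternative
-- what changed: Replaces A's nested scan (outer loop over the five priority dims, inner rescan of template_list per dim) by a single pass over template_list that keeps the best (lowest) dim rank seen so far, with strict less-than so the first template at each rank wins.
import Mathlib
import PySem

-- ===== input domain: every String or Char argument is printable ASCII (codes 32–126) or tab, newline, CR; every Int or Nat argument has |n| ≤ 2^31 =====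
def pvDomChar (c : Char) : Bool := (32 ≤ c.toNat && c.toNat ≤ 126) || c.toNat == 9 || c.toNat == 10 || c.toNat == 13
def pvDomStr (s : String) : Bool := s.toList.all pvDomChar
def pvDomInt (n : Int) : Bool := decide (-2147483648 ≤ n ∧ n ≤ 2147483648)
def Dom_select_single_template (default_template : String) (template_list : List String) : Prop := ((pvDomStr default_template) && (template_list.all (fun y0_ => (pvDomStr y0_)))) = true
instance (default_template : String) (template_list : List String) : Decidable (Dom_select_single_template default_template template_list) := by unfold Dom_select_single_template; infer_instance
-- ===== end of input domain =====

-- B replaces A's dims-outer/templates-inner nested scan by a single pass over template_list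
-- keeping the best (lowest) dim rank so far; same result, objective: alternative decomposition.

-- ===== PORT A =====
-- the dimension priority list ["Vec3", "Rigid3", "Vec2", "Rigid2", "Vec1"]
def pvDims : List String := ["Vec3", "Rigid3", "Vec2", "Rigid2", "Vec1"]

-- 'for dim in dims: for template in template_list: if "Cuda" not in template and dim in template: return template'
def pvALoop (ds : List String) (template_list : List String) : Option String :=
  match ds with
  | [] => none
  | d :: ds' =>
    match template_list.find? (fun t => !PySem.Str.isIn "Cuda" t && PySem.Str.isIn d t) with
    | some t => some t
    | none => pvALoop ds' template_list

def select_single_template (default_template : String) (template_list : List String) : String :=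
  if default_template ≠ "" then default_template
  else
    match pvALoop pvDims template_list with
    | some t => t
    | none =>
      -- 'for template in template_list: return template' then 'return ""'
      match template_list with
      | t :: _ => t
      | [] => ""

-- ===== PORT B =====
def select_single_template_alt (default_template : String) (template_list : List String) : String :=
  if default_template ≠ "" then default_template
  else
    -- single pass: keep (best_rank, best_template); strict < keeps the first at each rank
    let best := template_list.foldl
      (fun (best : Option (Nat × String)) t =>
        if PySem.Str.isIn "Cuda" t then best
        else
          match pvDims.findIdx? (fun d => PySem.Str.isIn d t) with
          | none => best
          | some i =>
            match best with
            | none => some (i, t)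
            | some (bi, _) => if i < bi then some (i, t) else best) none
    match best with
    | some (_, t) => t
    | none =>
      match template_list with
      | t :: _ => t
      | [] => ""

-- ===== PRECONDITION & SPEC =====
def Spec_select_single_template (default_template : String) (template_list : List String) (out : String) : Prop := out = select_single_template_alt default_template template_list
instance (default_template : String) (template_list : List String) (out : String) : Decidable (Spec_select_single_template default_template template_list out) := by unfold Spec_select_single_template; infer_instance

-- ===== CLAIM (what is proved, stated in full; the proofs are below) =====
def Claim_equal_select_single_template : Prop := ∀ (default_template : String) (template_list : List String), Dom_select_single_template default_template template_list → Spec_select_single_template default_template template_list (select_single_template default_template template_list)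

-- ===== LEMMAS AND PROOFS =====

-- the ranking function B's fold works with, relative to a dimension list ds
def pvRnk (ds : List String) (t : String) : Option Nat :=
  if PySem.Str.isIn "Cuda" t then none else ds.findIdx? (fun d => PySem.Str.isIn d t)

-- B's fold body, parametrized by an arbitrary ranking function r
def pvStep (r : String → Option Nat) (best : Option (Nat × String)) (t : String) : Option (Nat × String) :=
  match r t with
  | none => best
  | some i =>
    match best with
    | none => some (i, t)
    | some (bi, _) => if i < bi then some (i, t) else best

theorem pvStep_congr (r₁ r₂ : String → Option Nat) (b : Option (Nat × String)) (t : String)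
    (h : r₁ t = r₂ t) : pvStep r₁ b t = pvStep r₂ b t := by
  simp only [pvStep, h]

-- B's fold body is pvStep (pvRnk pvDims)
theorem pvBody_eq_step (b : Option (Nat × String)) (t : String) :
    (if PySem.Str.isIn "Cuda" t then b
     else
       match pvDims.findIdx? (fun d => PySem.Str.isIn d t) with
       | none => b
       | some i =>
         match b with
         | none => some (i, t)
         | some (bi, _) => if i < bi then some (i, t) else b) = pvStep (pvRnk pvDims) b t := by
  cases h : PySem.Str.isIn "Cuda" t <;> simp only [pvStep, pvRnk, h, if_true, if_false, Bool.false_eq_true]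

theorem pvFold_none (r : String → Option Nat) (ts : List String) (b : Option (Nat × String))
    (h : ∀ t ∈ ts, r t = none) : ts.foldl (pvStep r) b = b := by
  induction ts generalizing b with
  | nil => rfl
  | cons t ts ih =>
    have ht : r t = none := h t (by simp)
    simp only [List.foldl_cons, pvStep, ht]
    exact ih b (fun x hx => h x (by simp [hx]))

-- shifting all ranks by one shifts the fold's state by one
theorem pvFold_shift (r : String → Option Nat) (ts : List String) (b : Option (Nat × String)) :
    ts.foldl (pvStep (fun t => (r t).map (· + 1))) (b.map (fun p => (p.1 + 1, p.2)))
      = (ts.foldl (pvStep r) b).map (fun p => (p.1 + 1, p.2)) := by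
  induction ts generalizing b with
  | nil => rfl
  | cons t ts ih =>
    have hstep : pvStep (fun t => (r t).map (· + 1)) (b.map (fun p => (p.1 + 1, p.2))) t
        = (pvStep r b t).map (fun p => (p.1 + 1, p.2)) := by
      cases hr : r t with
      | none => simp [pvStep, hr]
      | some i =>
        cases b with
        | none => simp [pvStep, hr]
        | some p =>
          rcases p with ⟨bi, x⟩
          by_cases hlt : i < bi <;> simp [pvStep, hr, hlt]
    simp only [List.foldl_cons, hstep]
    exact ih (pvStep r b t)

-- once rank 0 is held, the fold never changes its state
theorem pvFold_zero_fixed (r : String → Option Nat) (ts : List String) (x : String) :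
    ts.foldl (pvStep r) (some (0, x)) = some (0, x) := by
  induction ts with
  | nil => rfl
  | cons t ts ih =>
    have : pvStep r (some (0, x)) t = some (0, x) := by
      cases hr : r t with
      | none => simp [pvStep, hr]
      | some i => simp [pvStep, hr]
    simp only [List.foldl_cons, this, ih]

-- over templates none of which has rank 0, the fold state never holds rank 0 (unless it started so)
theorem pvFold_no_zero (r : String → Option Nat) (ts : List String) (b : Option (Nat × String))
    (hts : ∀ t ∈ ts, r t ≠ some 0) (hb : ∀ x, b ≠ some (0, x)) :
    ∀ x, ts.foldl (pvStep r) b ≠ some (0, x) := by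
  induction ts generalizing b with
  | nil => exact hb
  | cons t ts ih =>
    simp only [List.foldl_cons]
    refine ih (pvStep r b t) (fun u hu => hts u (by simp [hu])) ?_
    intro x hx
    cases hr : r t with
    | none => exact hb x (by simpa [pvStep, hr] using hx)
    | some i =>
      cases b with
      | none =>
        simp [pvStep, hr] at hx
        exact hts t (by simp) (by rw [hr, hx.1])
      | some p =>
        rcases p with ⟨bi, y⟩
        by_cases hlt : i < bi
        · simp [pvStep, hr, hlt] at hx
          exact hts t (by simp) (by rw [hr, hx.1])
        · exact hb x (by simpa [pvStep, hr, hlt] using hx)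

-- the main correspondence: A's nested scan over ds equals B's single pass ranked by ds
theorem pvMain (ds : List String) (ts : List String) :
    pvALoop ds ts = (ts.foldl (pvStep (pvRnk ds)) none).map Prod.snd := by
  induction ds generalizing ts with
  | nil =>
    have h : ∀ t ∈ ts, pvRnk [] t = none := by intro t _; simp [pvRnk]
    rw [pvFold_none _ _ _ h]; rfl
  | cons d ds ih =>
    have hrnk : ∀ t, pvRnk (d :: ds) t
        = if (!PySem.Str.isIn "Cuda" t && PySem.Str.isIn d t) then some 0
          else (pvRnk ds t).map (· + 1) := by
      intro t
      cases hc : PySem.Str.isIn "Cuda" t <;>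
        cases hd : PySem.Str.isIn d t <;>
          simp only [pvRnk, hc, hd, List.findIdx?_cons, Bool.not_true, Bool.not_false,
            Bool.false_and, Bool.true_and, Bool.and_self, if_true, if_false,
            Bool.false_eq_true, Option.map_none]
    cases hf : ts.find? (fun t => !PySem.Str.isIn "Cuda" t && PySem.Str.isIn d t) with
    | some t0 =>
      obtain ⟨hq0, l₁, l₂, heq, hl₁⟩ := List.find?_eq_some_iff_append.mp hf
      subst heq
      have hts : ∀ t ∈ l₁, pvRnk (d :: ds) t ≠ some 0 := by
        intro t ht
        have hq : (!PySem.Str.isIn "Cuda" t && PySem.Str.isIn d t) = false := by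
          rcases Bool.eq_false_or_eq_true (!PySem.Str.isIn "Cuda" t && PySem.Str.isIn d t) with h | h
          · have h2 := hl₁ t ht; rw [h] at h2; simp at h2
          · exact h
        rw [hrnk t, hq]
        simp only [Bool.false_eq_true, if_false]
        cases pvRnk ds t <;> simp
      have hstate : l₁.foldl (pvStep (pvRnk (d :: ds))) none = none ∨
          ∃ i x, 0 < i ∧ l₁.foldl (pvStep (pvRnk (d :: ds))) none = some (i, x) := by
        cases hfold : l₁.foldl (pvStep (pvRnk (d :: ds))) none with
        | none => exact Or.inl rfl
        | some p =>
          rcases p with ⟨i, x⟩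
          refine Or.inr ⟨i, x, ?_, rfl⟩
          rcases Nat.eq_zero_or_pos i with h0 | h
          · exact absurd (h0 ▸ hfold)
              (pvFold_no_zero (pvRnk (d :: ds)) l₁ none hts (by simp) x)
          · exact h
      have hmid : (l₁ ++ t0 :: l₂).foldl (pvStep (pvRnk (d :: ds))) none = some (0, t0) := by
        rw [List.foldl_append, List.foldl_cons]
        have hr0 : pvRnk (d :: ds) t0 = some 0 := by rw [hrnk t0, if_pos hq0]
        rcases hstate with h | ⟨i, x, hi, h⟩
        · rw [h]
          have : pvStep (pvRnk (d :: ds)) none t0 = some (0, t0) := by simp [pvStep, hr0]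
          rw [this]; exact pvFold_zero_fixed _ _ _
        · rw [h]
          have : pvStep (pvRnk (d :: ds)) (some (i, x)) t0 = some (0, t0) := by
            simp [pvStep, hr0, hi]
          rw [this]; exact pvFold_zero_fixed _ _ _
      simp only [pvALoop, hf, hmid, Option.map_some]
    | none =>
      have hnone : ∀ t ∈ ts, ¬ (!PySem.Str.isIn "Cuda" t && PySem.Str.isIn d t) = true := by
        intro t ht; exact List.find?_eq_none.mp hf t ht
      have hcong : ts.foldl (pvStep (pvRnk (d :: ds))) none
          = ts.foldl (pvStep (fun t => (pvRnk ds t).map (· + 1))) none := by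
        apply PySem.List.foldl_congr_mem
        intro b t ht
        refine pvStep_congr _ _ _ _ ?_
        have hq : (!PySem.Str.isIn "Cuda" t && PySem.Str.isIn d t) = false :=
          Bool.of_not_eq_true (hnone t ht)
        rw [hrnk t, hq]
        simp only [Bool.false_eq_true, if_false]
      simp only [pvALoop, hf]
      rw [hcong]
      have := pvFold_shift (pvRnk ds) ts none
      simp only [Option.map_none] at this
      rw [this, ih ts]
      cases ts.foldl (pvStep (pvRnk ds)) none <;> rfl

-- ===== VERDICT (by name: the statement is the Claim_ definition above) =====
theorem select_single_template_spec : Claim_equal_select_single_template := by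
  intro default_template template_list _
  unfold Spec_select_single_template select_single_template select_single_template_alt
  by_cases hd : default_template ≠ ""
  · simp [hd]
  · simp only [hd, if_false]
    have hbody : (fun (best : Option (Nat × String)) t =>
        if PySem.Str.isIn "Cuda" t then best
        else
          match pvDims.findIdx? (fun d => PySem.Str.isIn d t) with
          | none => best
          | some i =>
            match best with
            | none => some (i, t)
            | some (bi, _) => if i < bi then some (i, t) else best)
        = pvStep (pvRnk pvDims) := by
      funext b t; exact pvBody_eq_step b t
    rw [hbody, pvMain pvDims template_list]
    cases template_list.foldl (pvStep (pvRnk pvDims)) none with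
    | none => rfl
    | some p => rfl
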